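-- pv_equiv track=rewrite | github.com/ash0814/Al-th | sumsong/brute_force/[1]모의고사.py | solution
-- ===== SOURCE A (Python) =====
-- def solution(answers):
--     answer = []
--     sc1, sc2, sc3 = 0, 0, 0
--     type1 = [1, 2, 3, 4, 5]
--     type2 = [2, 1, 2, 3, 2, 4, 2, 5]
--     type3 = [3, 3, 1, 1, 2, 2, 4, 4, 5, 5]
--
--     for i in range(len(answers)):
--         if answers[i] == type1[i % len(type1)]: sc1 += 1
--         if answers[i] == type2[i % len(type2)]: sc2 += 1
--         if answers[i] == type3[i % len(type3)]: sc3 += 1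
--
--     result = [sc1, sc2, sc3]
--     for index, score in enumerate(result):
--         if score == max(result): answer.append(index + 1)
--
--     return answer
-- ===== SOURCE B (Python) =====
-- def solution(answers):
--     patterns = [[1, 2, 3, 4, 5],
--                 [2, 1, 2, 3, 2, 4, 2, 5],
--                 [3, 3, 1, 1, 2, 2, 4, 4, 5, 5]]
--     P = 40  # lcm of the pattern lengths: positions congruent mod 40 see identical pattern values
--     buckets = [{} for _ in range(P)]
--     for j, a in enumerate(answers):
--         b = buckets[j % P]
--         b[a] = b.get(a, 0) + 1
--     scores = [sum(buckets[r].get(pat[r % len(pat)], 0) for r in range(P))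
--               for pat in patterns]
--     best = max(scores)
--     return [i + 1 for i, s in enumerate(scores) if s == best]
-- ===== Notes on version B (the rewrite author's own statement) =====
-- stated objective: alternative
-- what changed: B never compares an answer against a pattern while scanning: one pass groups the answers into 40 residue-class counters (40 = lcm of the pattern lengths, keyed by position mod 40), then each pattern's score is read off as a 40-term sum of counter lookups at the pattern value for that residue; winners are picked by filter over enumerate(scores).
import Mathlib
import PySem

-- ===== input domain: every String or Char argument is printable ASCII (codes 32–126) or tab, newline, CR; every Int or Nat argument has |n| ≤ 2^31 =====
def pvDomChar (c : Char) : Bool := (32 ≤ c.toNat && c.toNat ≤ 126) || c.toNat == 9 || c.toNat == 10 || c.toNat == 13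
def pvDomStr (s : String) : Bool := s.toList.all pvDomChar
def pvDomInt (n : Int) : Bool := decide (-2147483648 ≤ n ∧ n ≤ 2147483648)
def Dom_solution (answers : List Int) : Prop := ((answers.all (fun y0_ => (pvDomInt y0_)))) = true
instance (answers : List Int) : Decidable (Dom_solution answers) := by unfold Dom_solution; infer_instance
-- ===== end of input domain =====

set_option maxRecDepth 8000

-- B groups answers into 40 residue-class counters (40 = lcm of the pattern lengths) and reads
-- each score off as a 40-term sum of counter lookups, instead of A's fused per-answer
-- pattern comparisons; objective: alternative.

-- ===== PORT A =====
-- A's single loop over indices with three accumulators; answers[i] and type[i % len] are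
-- always in range, so pyGetD with default 0 is exact here; max(result) on the nonempty
-- 3-element list via max?.
def solution (answers : List Int) : List Int :=
  let type1 : List Int := [1, 2, 3, 4, 5]
  let type2 : List Int := [2, 1, 2, 3, 2, 4, 2, 5]
  let type3 : List Int := [3, 3, 1, 1, 2, 2, 4, 4, 5, 5]
  let s := (PySem.List.pyRange 0 (answers.length : Int) 1).foldl
    (fun (sc : Int × Int × Int) i =>
      (if PySem.List.pyGetD answers i 0 = PySem.List.pyGetD type1 (PySem.Int.mod i (type1.length : Int)) 0 then sc.1 + 1 else sc.1,
       if PySem.List.pyGetD answers i 0 = PySem.List.pyGetD type2 (PySem.Int.mod i (type2.length : Int)) 0 then sc.2.1 + 1 else sc.2.1,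
       if PySem.List.pyGetD answers i 0 = PySem.List.pyGetD type3 (PySem.Int.mod i (type3.length : Int)) 0 then sc.2.2 + 1 else sc.2.2))
    ((0 : Int), (0 : Int), (0 : Int))
  let result : List Int := [s.1, s.2.1, s.2.2]
  let mx := (PySem.List.max? result (fun y => y)).getD 0
  (PySem.List.enumerate result 0).foldl
    (fun ans p => if p.2 = mx then ans ++ [p.1 + 1] else ans) []

-- ===== PORT B =====
-- b[a] = b.get(a, 0) + 1 on bucket j % 40: position indices are nonnegative, so Python's
-- j % 40 is Nat mod, and j % 40 < 40 = len(buckets), so list get/set are in range (exact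
-- with List.getD/List.set).
def bucketStep (bs : List (PySem.Dict Int Int)) (r : Nat) (a : Int) : List (PySem.Dict Int Int) :=
  bs.set r ((bs.getD r PySem.Dict.empty).insert a ((bs.getD r PySem.Dict.empty).getD a 0 + 1))

-- the 'for j, a in enumerate(answers)' bucketing loop, index carried as a Nat counter
def bucketLoop : List Int → Nat → List (PySem.Dict Int Int) → List (PySem.Dict Int Int)
  | [], _, bs => bs
  | a :: rest, j, bs => bucketLoop rest (j + 1) (bucketStep bs (j % 40) a)

-- sum(buckets[r].get(pat[r % len(pat)], 0) for r in range(P))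
def bucketScore (bs : List (PySem.Dict Int Int)) (pat : List Int) : Int :=
  ((List.range 40).map
    (fun r => (bs.getD r PySem.Dict.empty).getD (pat.getD (r % pat.length) 0) 0)).sum

def solution_alt (answers : List Int) : List Int :=
  let patterns : List (List Int) :=
    [[1, 2, 3, 4, 5], [2, 1, 2, 3, 2, 4, 2, 5], [3, 3, 1, 1, 2, 2, 4, 4, 5, 5]]
  let buckets := bucketLoop answers 0 (List.replicate 40 PySem.Dict.empty)
  let scores := patterns.map (fun pat => bucketScore buckets pat)
  let best := (PySem.List.max? scores (fun y => y)).getD 0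
  ((PySem.List.enumerate scores 0).filter (fun p => p.2 = best)).map (fun p => p.1 + 1)

-- ===== PRECONDITION & SPEC =====
def Spec_solution (answers : List Int) (out : List Int) : Prop := out = solution_alt answers
instance (answers : List Int) (out : List Int) : Decidable (Spec_solution answers out) := by unfold Spec_solution; infer_instance

-- ===== CLAIM (what is proved, stated in full; the proofs are below) =====
def Claim_equal_solution : Prop := ∀ (answers : List Int), Dom_solution answers → Spec_solution answers (solution answers)

-- ===== LEMMAS AND PROOFS =====

-- Common specification: matches of `ans` against `pat` cycled, starting at position k.
def S (pat : List Int) (k : Nat) : List Int → Int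
  | [] => 0
  | a :: r => (if a = pat.getD (k % pat.length) 0 then 1 else 0) + S pat (k + 1) r

lemma S_cons (pat : List Int) (k : Nat) (a : Int) (r : List Int) :
    S pat k (a :: r) = (if a = pat.getD (k % pat.length) 0 then 1 else 0) + S pat (k + 1) r := rfl

-- A's fused loop computes the three S-counts.
lemma afold (answers : List Int) :
    ∀ (tl : List Int) (k : Nat) (init : Int × Int × Int),
      answers.drop k = tl → k ≤ answers.length →
      (PySem.List.pyRange (k : Int) (answers.length : Int) 1).foldl
        (fun (sc : Int × Int × Int) i =>
          (if PySem.List.pyGetD answers i 0 = PySem.List.pyGetD [(1:Int), 2, 3, 4, 5] (PySem.Int.mod i 5) 0 then sc.1 + 1 else sc.1,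
           if PySem.List.pyGetD answers i 0 = PySem.List.pyGetD [(2:Int), 1, 2, 3, 2, 4, 2, 5] (PySem.Int.mod i 8) 0 then sc.2.1 + 1 else sc.2.1,
           if PySem.List.pyGetD answers i 0 = PySem.List.pyGetD [(3:Int), 3, 1, 1, 2, 2, 4, 4, 5, 5] (PySem.Int.mod i 10) 0 then sc.2.2 + 1 else sc.2.2)) init
      = (init.1 + S [1, 2, 3, 4, 5] k tl,
         init.2.1 + S [2, 1, 2, 3, 2, 4, 2, 5] k tl,
         init.2.2 + S [3, 3, 1, 1, 2, 2, 4, 4, 5, 5] k tl) := by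
  intro tl
  induction tl with
  | nil =>
    intro k init hdrop hk
    have hk' : answers.length ≤ k := by
      by_contra h
      have := List.drop_eq_nil_iff.mp hdrop
      omega
    rw [PySem.List.pyRange_one_eq_nil (by exact_mod_cast hk')]
    simp [S]
  | cons a r ih =>
    intro k init hdrop hk
    have hklt : k < answers.length := by
      by_contra h
      rw [List.drop_eq_nil_iff.mpr (by omega)] at hdrop
      exact absurd hdrop (by simp)
    have ha : answers.getD k 0 = a := by
      have h1 : (a :: r).head? = answers[k]? := by rw [← hdrop]; exact List.head?_drop
      rw [List.getD_eq_getElem?_getD, ← h1]; rfl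
    have hdrop' : answers.drop (k + 1) = r := by
      rw [← List.drop_drop, hdrop]; rfl
    rw [PySem.List.pyRange_one_cons (by exact_mod_cast hklt), List.foldl_cons]
    have hcast : ((k : Int) + 1) = ((k + 1 : Nat) : Int) := by push_cast; ring
    rw [hcast, ih (k + 1) _ hdrop' (by omega)]
    have hmod5 : PySem.Int.mod (k : Int) 5 = ((k % 5 : Nat) : Int) := PySem.Int.mod_natCast k 5
    have hmod8 : PySem.Int.mod (k : Int) 8 = ((k % 8 : Nat) : Int) := PySem.Int.mod_natCast k 8
    have hmod10 : PySem.Int.mod (k : Int) 10 = ((k % 10 : Nat) : Int) := PySem.Int.mod_natCast k 10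
    have hl5 : ([1, 2, 3, 4, 5] : List Int).length = 5 := rfl
    have hl8 : ([2, 1, 2, 3, 2, 4, 2, 5] : List Int).length = 8 := rfl
    have hl10 : ([3, 3, 1, 1, 2, 2, 4, 4, 5, 5] : List Int).length = 10 := rfl
    simp only [hmod5, hmod8, hmod10, PySem.List.pyGetD_natCast, ha, S_cons, hl5, hl8, hl10]
    refine Prod.ext ?_ (Prod.ext ?_ ?_) <;> dsimp only <;> split_ifs <;> ring

-- a sum over range n of two functions differing only at r0 < n
lemma sum_map_range_delta (f g : Nat → Int) :
    ∀ (n r0 : Nat), r0 < n → (∀ r, r ≠ r0 → f r = g r) →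
      ((List.range n).map f).sum = ((List.range n).map g).sum + (f r0 - g r0) := by
  intro n
  induction n with
  | zero => intro r0 h; omega
  | succ n ih =>
    intro r0 h hfg
    rw [List.range_succ, List.map_append, List.map_append, List.sum_append, List.sum_append]
    by_cases hr : r0 = n
    · subst hr
      have hcg : ∀ r ∈ List.range r0, f r = g r := by
        intro r hrm
        exact hfg r (by simp at hrm; omega)
      rw [List.map_congr_left hcg]
      simp only [List.map_cons, List.map_nil, List.sum_cons, List.sum_nil]
      ring
    · simp only [List.map_cons, List.map_nil, List.sum_cons, List.sum_nil]
      rw [ih r0 (by omega) hfg, hfg n (fun h' => hr h'.symm)]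
      ring

lemma length_bucketStep (bs : List (PySem.Dict Int Int)) (r : Nat) (a : Int) :
    (bucketStep bs r a).length = bs.length := by
  simp [bucketStep]

lemma getD_bucketStep (bs : List (PySem.Dict Int Int)) (r0 : Nat) (a : Int)
    (h : r0 < bs.length) (r : Nat) :
    (bucketStep bs r0 a).getD r PySem.Dict.empty =
      if r = r0 then (bs.getD r0 PySem.Dict.empty).insert a ((bs.getD r0 PySem.Dict.empty).getD a 0 + 1)
      else bs.getD r PySem.Dict.empty := by
  unfold bucketStep
  rw [List.getD_eq_getElem?_getD, List.getElem?_set]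
  by_cases he : r = r0
  · subst he
    rw [if_pos rfl, if_pos h, if_pos rfl]
    simp [List.getD_eq_getElem?_getD]
  · rw [if_neg (fun h' => he h'.symm), if_neg he, List.getD_eq_getElem?_getD]

-- one bucket step changes a pattern's bucketScore by exactly the match indicator
lemma bucketScore_step (bs : List (PySem.Dict Int Int)) (pat : List Int) (r0 : Nat) (a : Int)
    (hlen : bs.length = 40) (hr0 : r0 < 40) :
    bucketScore (bucketStep bs r0 a) pat =
      bucketScore bs pat + (if a = pat.getD (r0 % pat.length) 0 then 1 else 0) := by
  unfold bucketScore
  rw [sum_map_range_delta _ _ 40 r0 hr0 (by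
    intro r hne
    rw [getD_bucketStep bs r0 a (by omega) r, if_neg hne])]
  rw [getD_bucketStep bs r0 a (by omega) r0, if_pos rfl]
  rw [PySem.Dict.getD_insert]
  by_cases h : a = pat.getD (r0 % pat.length) 0
  · rw [if_pos h.symm, if_pos h, h]
    ring
  · rw [if_neg (fun h' => h h'.symm), if_neg h]
    ring

-- the bucketing loop accumulates S for any pattern whose length divides 40
lemma bucketLoop_score (pat : List Int) (hdvd : pat.length ∣ 40) :
    ∀ (ans : List Int) (j : Nat) (bs : List (PySem.Dict Int Int)), bs.length = 40 →
      bucketScore (bucketLoop ans j bs) pat = bucketScore bs pat + S pat j ans := by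
  intro ans
  induction ans with
  | nil => intro j bs _; simp [bucketLoop, S]
  | cons a r ih =>
    intro j bs hlen
    rw [bucketLoop, ih (j + 1) _ (by rw [length_bucketStep]; exact hlen)]
    rw [bucketScore_step bs pat (j % 40) a hlen (Nat.mod_lt _ (by norm_num))]
    rw [Nat.mod_mod_of_dvd j hdvd, S_cons]
    ring

lemma bucketScore_init (pat : List Int) :
    bucketScore (List.replicate 40 PySem.Dict.empty) pat = 0 := by
  unfold bucketScore
  apply List.sum_eq_zero
  intro x hx
  simp only [List.mem_map] at hx
  obtain ⟨r, _, hr⟩ := hx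
  have he : (List.replicate 40 (PySem.Dict.empty : PySem.Dict Int Int)).getD r PySem.Dict.empty
      = PySem.Dict.empty := by
    rw [List.getD_eq_getElem?_getD, List.getElem?_replicate]
    split_ifs <;> rfl
  rw [he, PySem.Dict.getD_empty] at hr
  exact hr.symm

-- the final bucket sum is the sequential match count
lemma bucketScore_eq_S (answers pat : List Int) (hdvd : pat.length ∣ 40) :
    bucketScore (bucketLoop answers 0 (List.replicate 40 PySem.Dict.empty)) pat = S pat 0 answers := by
  rw [bucketLoop_score pat hdvd answers 0 _ (by simp), bucketScore_init]
  ring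

-- The two final passes agree on any concrete 3-element score list.
lemma final_eq (x y z : Int) :
    (PySem.List.enumerate [x, y, z] 0).foldl
      (fun ans p => if p.2 = (PySem.List.max? [x, y, z] (fun w => w)).getD 0 then ans ++ [p.1 + 1] else ans) []
    = ((PySem.List.enumerate [x, y, z] 0).filter
        (fun p => p.2 = (PySem.List.max? [x, y, z] (fun w => w)).getD 0)).map (fun p => p.1 + 1) := by
  generalize (PySem.List.max? [x, y, z] (fun w => w)).getD 0 = mx
  simp only [PySem.List.enumerate_cons, PySem.List.enumerate_nil, List.foldl_cons, List.foldl_nil,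
    List.filter_cons, List.filter_nil]
  split_ifs <;> simp_all

-- ===== VERDICT (by name: the statement is the Claim_ definition above) =====
theorem solution_spec : Claim_equal_solution := by
  intro answers _
  unfold Spec_solution solution solution_alt
  simp only
  have h1 : (([1, 2, 3, 4, 5] : List Int).length : Int) = 5 := by norm_num
  have h2 : (([2, 1, 2, 3, 2, 4, 2, 5] : List Int).length : Int) = 8 := by norm_num
  have h3 : (([3, 3, 1, 1, 2, 2, 4, 4, 5, 5] : List Int).length : Int) = 10 := by norm_num
  have hA := afold answers answers 0 ((0:Int), (0:Int), (0:Int)) (by simp) (by simp)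
  rw [Nat.cast_zero] at hA
  simp only [h1, h2, h3]
  rw [hA]
  simp only [List.map_cons, List.map_nil,
    bucketScore_eq_S answers [1, 2, 3, 4, 5] (by norm_num),
    bucketScore_eq_S answers [2, 1, 2, 3, 2, 4, 2, 5] (by norm_num),
    bucketScore_eq_S answers [3, 3, 1, 1, 2, 2, 4, 4, 5, 5] (by norm_num)]
  simp only [zero_add]
  exact final_eq _ _ _
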